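-- pv_equiv track=rewrite | github.com/NIH-NLM/nlm-ckn-etl | python/src/LoaderUtilities.py | hyphenate
-- ===== SOURCE A (Python) =====
-- def hyphenate(iname):
--     """Replace spaces, underscores, commas and forward slashes with
--     hyphens, but only one. Also strips non-ASCII characters (via Unicode
--     NFD decomposition) so that the result is safe for use as an ArangoDB
--     document key, which requires ASCII-only values.
--
--     Parameters
--     ----------
--     iname : str
--         Input name
--
--     Returns
--     -------
--     oname : str
--         Output name
--     """
--     import unicodedata
--     # Decompose accented characters (e.g. ï → i + combining diaeresis)
--     # then drop any byte that isn't plain ASCII.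
--     cname = unicodedata.normalize("NFD", iname).encode("ascii", "ignore").decode("ascii")
--     for c in [" ", "_", ",", "/"]:
--         cname = cname.replace(c, "-")
--         oname = cname.replace("--", "-")
--         while cname != oname:
--             cname = oname
--             oname = oname.replace("--", "-")
--     return oname
-- ===== SOURCE B (Python) =====
-- def hyphenate(iname):
--     """Single-pass re-implementation: map delimiters to '-' and collapse
--     hyphen runs in one scan (instead of repeated global replaces)."""
--     import unicodedata
--     cname = unicodedata.normalize("NFD", iname).encode("ascii", "ignore").decode("ascii")
--     out = []
--     for ch in cname:
--         if ch in (" ", "_", ",", "/", "-"):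
--             if not out or out[-1] != "-":
--                 out.append("-")
--         else:
--             out.append(ch)
--     return "".join(out)
-- ===== Notes on version B (the rewrite author's own statement) =====
-- stated objective: alternative
-- what changed: B replaces A's four global delimiter-replace passes plus an iterated whole-string collapse loop for doubled hyphens by a single left-to-right scan that emits one hyphen per delimiter/hyphen run, tracking whether the last emitted character is a hyphen.
import Mathlib
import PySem

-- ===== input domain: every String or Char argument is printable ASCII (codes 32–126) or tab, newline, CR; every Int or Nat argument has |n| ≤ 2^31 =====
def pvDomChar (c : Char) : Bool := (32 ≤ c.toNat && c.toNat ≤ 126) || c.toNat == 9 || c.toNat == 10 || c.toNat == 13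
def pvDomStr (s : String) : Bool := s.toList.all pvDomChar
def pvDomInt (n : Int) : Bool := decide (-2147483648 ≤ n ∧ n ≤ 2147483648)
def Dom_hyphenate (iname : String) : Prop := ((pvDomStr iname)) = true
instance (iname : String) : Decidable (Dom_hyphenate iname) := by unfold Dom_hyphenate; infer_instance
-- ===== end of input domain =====

-- B replaces A's repeated global replace-and-collapse passes by one left-to-right scan
-- that emits '-' for a delimiter run only when the previously emitted char is not '-';
-- objective: alternative (single pass instead of iterated whole-string replaces).

-- ===== PORT A =====
-- A-side helper lemmas needed for the termination of the `while cname != oname` loop.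
-- `repl2 l` is one Python pass of `l.replace("--","-")` (leftmost, non-overlapping).
def repl2 : List Char → List Char
  | [] => []
  | [c] => [c]
  | c :: d :: t => if c = '-' ∧ d = '-' then '-' :: repl2 t else c :: repl2 (d :: t)

theorem go_dd (l : List Char) : ∀ (fuel : Nat) (acc : List Char), l.length ≤ fuel →
    PySem.Chars.replace.go ['-','-'] ['-'] fuel l acc = acc.reverse ++ repl2 l := by
  induction l using repl2.induct with
  | case1 => intro fuel acc h; cases fuel <;> simp [PySem.Chars.replace.go, repl2]
  | case2 c =>
    intro fuel acc h
    match fuel, h with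
    | f + 1, _ =>
      rw [PySem.Chars.replace.go]
      have : ¬ (['-','-'].isPrefixOf [c] = true) := by simp [List.isPrefixOf]
      simp only [this, if_false]
      cases f <;> simp [PySem.Chars.replace.go, repl2]
  | case3 c d t hcd ih =>
    intro fuel acc h
    obtain ⟨hc, hd⟩ := hcd; subst hc; subst hd
    match fuel, h with
    | f + 1, h =>
      rw [PySem.Chars.replace.go]
      simp only [List.isPrefixOf, BEq.rfl, Bool.true_and, Bool.and_true, if_pos,
        List.length_cons, List.length_nil, List.drop_succ_cons, List.drop_zero,
        List.reverse_cons, List.reverse_nil, List.nil_append, List.singleton_append]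
      rw [ih f ('-' :: acc) (by simp at h ⊢; omega)]
      simp [repl2]
  | case4 c d t hcd ih =>
    intro fuel acc h
    match fuel, h with
    | f + 1, h =>
      rw [PySem.Chars.replace.go]
      have : ¬ (['-','-'].isPrefixOf (c :: d :: t) = true) := by
        simp only [List.isPrefixOf, Bool.and_eq_true, beq_iff_eq, Bool.and_true]
        rintro ⟨h1, h2⟩; exact hcd ⟨h1.symm, h2.symm⟩
      simp only [this, if_false]
      rw [ih f (c :: acc) (by simp at h ⊢; omega)]
      simp only [repl2, if_neg hcd]
      simp
termination_by _ => l.length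

theorem replace_dd (l : List Char) : PySem.Chars.replace l ['-','-'] ['-'] = repl2 l := by
  rw [PySem.Chars.replace]
  simp only [List.isEmpty, if_false]
  rw [go_dd l l.length [] le_rfl]
  simp

theorem repl2_len_le (l : List Char) : (repl2 l).length ≤ l.length := by
  induction l using repl2.induct with
  | case1 => simp [repl2]
  | case2 c => simp [repl2]
  | case3 c d t hcd ih => simp only [repl2, if_pos hcd]; simp; omega
  | case4 c d t hcd ih => simp only [repl2, if_neg hcd]; simp at ih ⊢; omega

theorem repl2_lt_or_eq (l : List Char) : (repl2 l).length < l.length ∨ repl2 l = l := by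
  induction l using repl2.induct with
  | case1 => right; simp [repl2]
  | case2 c => right; simp [repl2]
  | case3 c d t hcd =>
    left; simp only [repl2, if_pos hcd]
    have := repl2_len_le t; simp; omega
  | case4 c d t hcd ih =>
    simp only [repl2, if_neg hcd]
    rcases ih with h | h
    · left; simp at h ⊢; omega
    · right; rw [h]

theorem replace_dd_str_lt (s : String) (h : ¬ PySem.Str.replace s "--" "-" = s) :
    (PySem.Str.replace s "--" "-").toList.length < s.toList.length := by
  have ht : (PySem.Str.replace s "--" "-").toList = repl2 s.toList := by
    rw [PySem.Str.toList_replace]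
    have h2 : ("--" : String).toList = ['-','-'] := by decide
    have h1 : ("-" : String).toList = ['-'] := by decide
    rw [h2, h1, replace_dd]
  rcases repl2_lt_or_eq s.toList with hlt | heq
  · rw [ht]; exact hlt
  · exfalso; apply h; apply String.toList_inj.mp; rw [ht, heq]

-- the `while cname != oname:` collapse loop of A
def pyCollapseLoop (s : String) : String :=
  let o := PySem.Str.replace s "--" "-"
  if o = s then s else pyCollapseLoop o
termination_by s.toList.length
decreasing_by exact replace_dd_str_lt s (by assumption)

def hyphenate (iname : String) : String :=
  -- NFD normalization followed by ascii-encode/ignore: ported as dropping all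
  -- code points above 127 (exact on ASCII-only input, which Dom_hyphenate guarantees:
  -- NFD is the identity there and nothing is dropped).
  let cname := String.ofList (iname.toList.filter (fun c => c.toNat ≤ 127))
  [" ", "_", ",", "/"].foldl
    (fun s c => pyCollapseLoop (PySem.Str.replace s c "-")) cname

-- ===== PORT B =====
def hyphenate_alt (iname : String) : String :=
  let cname := String.ofList (iname.toList.filter (fun c => c.toNat ≤ 127))
  String.ofList (cname.toList.foldl
    (fun out ch =>
      if ch ∈ [' ', '_', ',', '/', '-'] then
        if out = [] ∨ out.getLast? ≠ some '-' then out ++ ['-'] else out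
      else out ++ [ch]) [])

-- ===== PRECONDITION & SPEC =====
def Spec_hyphenate (iname : String) (out : String) : Prop := out = hyphenate_alt iname
instance (iname : String) (out : String) : Decidable (Spec_hyphenate iname out) := by unfold Spec_hyphenate; infer_instance

-- ===== CLAIM (what is proved, stated in full; the proofs are below) =====
def Claim_equal_hyphenate : Prop := ∀ (iname : String), Dom_hyphenate iname → Spec_hyphenate iname (hyphenate iname)

-- ===== LEMMAS AND PROOFS =====

-- one-pass scan with predicate P: characters with `P c || c == '-'` become a single
-- hyphen per run (b records whether the last emitted char is '-'), others pass through
def scanP (P : Char → Bool) : Bool → List Char → List Char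
  | _, [] => []
  | b, c :: t =>
    if P c || c == '-' then
      (if b then scanP P true t else '-' :: scanP P true t)
    else c :: scanP P false t

theorem go_single (d : Char) (l : List Char) : ∀ (fuel : Nat) (acc : List Char), l.length ≤ fuel →
    PySem.Chars.replace.go [d] ['-'] fuel l acc
      = acc.reverse ++ l.map (fun c => if c == d then '-' else c) := by
  induction l with
  | nil => intro fuel acc h; cases fuel <;> simp [PySem.Chars.replace.go]
  | cons c t ih =>
    intro fuel acc h
    match fuel, h with
    | f + 1, h =>
      rw [PySem.Chars.replace.go]
      by_cases hc : d = c
      · subst hc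
        simp only [List.isPrefixOf, BEq.rfl, Bool.true_and, if_pos,
          List.length_cons, List.length_nil, List.drop_succ_cons, List.drop_zero,
          List.reverse_cons, List.reverse_nil, List.nil_append, List.singleton_append]
        rw [ih f ('-' :: acc) (by simp at h ⊢; omega)]
        simp
      · have hpf : ([d].isPrefixOf (c :: t)) = false := by
          simp [List.isPrefixOf]; exact fun hx => hc hx
        simp only [hpf, Bool.false_eq_true, if_false]
        rw [ih f (c :: acc) (by simp at h ⊢; omega)]
        have hne : ¬ c = d := fun hx => hc hx.symm
        simp [hne]

theorem replace_single (l : List Char) (d : Char) :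
    PySem.Chars.replace l [d] ['-'] = l.map (fun c => if c == d then '-' else c) := by
  rw [PySem.Chars.replace]
  simp only [List.isEmpty, if_false]
  rw [go_single d l l.length [] le_rfl]
  simp

-- scanP is invariant under one replace("--","-") pass
theorem scanP_repl2 (P : Char → Bool) (l : List Char) : ∀ b, scanP P b (repl2 l) = scanP P b l := by
  induction l using repl2.induct with
  | case1 => intro b; simp [repl2]
  | case2 c => intro b; simp [repl2]
  | case3 c d t hcd ih =>
    intro b
    obtain ⟨hc, hd⟩ := hcd; subst hc; subst hd
    simp only [repl2, if_pos (And.intro rfl rfl)]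
    cases b <;> simp [scanP, ih]
  | case4 c d t hcd ih =>
    intro b
    simp only [repl2, if_neg hcd]
    by_cases hc : (P c || c == '-') = true
    · cases b <;> simp [scanP, hc, ih]
    · simp [scanP, hc, ih]

-- at a fixpoint of repl2, scanP with the trivial predicate is the identity
theorem repl2_fix_scan (l : List Char) (h : repl2 l = l) :
    scanP (fun _ => false) false l = l := by
  induction l using repl2.induct with
  | case1 => simp [scanP]
  | case2 c => by_cases hc : c = '-' <;> simp [scanP, hc]
  | case3 c d t hcd =>
    exfalso
    rw [repl2, if_pos hcd] at h
    have h1 := repl2_len_le t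
    have h2 := congrArg List.length h
    simp at h2; omega
  | case4 c d t hcd ih =>
    rw [repl2, if_neg hcd] at h
    have ht : repl2 (d :: t) = d :: t := (List.cons.inj h).2
    have ihd := ih ht
    by_cases hc : c = '-'
    · subst hc
      have hd : ¬ d = '-' := fun hdd => hcd ⟨rfl, hdd⟩
      simp [scanP, hd] at ihd ⊢
      exact ihd
    · have hstep : scanP (fun _ => false) false (c :: d :: t)
          = c :: scanP (fun _ => false) false (d :: t) := by simp [scanP, hc]
      rw [hstep, ihd]

theorem pyCollapseLoop_toList (s : String) :
    (pyCollapseLoop s).toList = scanP (fun _ => false) false s.toList := by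
  fun_induction pyCollapseLoop s with
  | case1 s o heq =>
    have ho : o = PySem.Str.replace s "--" "-" := rfl
    have ht : o.toList = repl2 s.toList := by
      rw [ho, PySem.Str.toList_replace]
      have h2 : ("--" : String).toList = ['-','-'] := by decide
      have h1 : ("-" : String).toList = ['-'] := by decide
      rw [h2, h1, replace_dd]
    have : repl2 s.toList = s.toList := by rw [← ht, heq]
    exact (repl2_fix_scan s.toList this).symm
  | case2 s o hne ih =>
    have ho : o = PySem.Str.replace s "--" "-" := rfl
    have ht : o.toList = repl2 s.toList := by
      rw [ho, PySem.Str.toList_replace]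
      have h2 : ("--" : String).toList = ['-','-'] := by decide
      have h1 : ("-" : String).toList = ['-'] := by decide
      rw [h2, h1, replace_dd]
    rw [ih, ht, scanP_repl2]

-- mapping Q-characters to '-' before a scan is the same as adding Q to the predicate
theorem scanP_map (P Q : Char → Bool) (l : List Char) : ∀ b,
    scanP P b (l.map (fun c => if Q c then '-' else c)) = scanP (fun c => P c || Q c) b l := by
  induction l with
  | nil => intro b; simp [scanP]
  | cons c t ih =>
    intro b
    simp only [List.map]
    by_cases hq : Q c = true
    · rw [if_pos hq]
      have h1 : (P '-' || '-' == '-') = true := by simp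
      have h2 : ((P c || Q c) || c == '-') = true := by simp [hq]
      rw [scanP, if_pos h1, scanP, if_pos h2]
      cases b <;> simp [ih true]
    · rw [if_neg hq]
      have hQ : Q c = false := by simpa using hq
      cases hpc : (P c || c == '-') with
      | true =>
        have h2 : ((P c || Q c) || c == '-') = true := by
          rcases Bool.or_eq_true_iff.mp hpc with h | h <;> simp [h]
        rw [scanP, if_pos hpc, scanP, if_pos h2]
        cases b <;> simp [ih true]
      | false =>
        have h2 : ((P c || Q c) || c == '-') = false := by
          rcases Bool.or_eq_false_iff.mp hpc with ⟨h1, h3⟩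
          simp [h1, h3, hQ]
        rw [scanP, hpc, scanP, h2]
        simp only [Bool.false_eq_true, if_false]
        rw [ih false]

-- fusing two scans: the outer predicate absorbs the inner one
theorem scanP_scanP (P Q : Char → Bool) (l : List Char) : ∀ (bo bi : Bool), (bi = true → bo = true) →
    scanP P bo (scanP Q bi l) = scanP (fun c => P c || Q c) bo l := by
  induction l with
  | nil => intro bo bi _; simp [scanP]
  | cons c t ih =>
    intro bo bi hbi
    cases hq : (Q c || c == '-') with
    | true =>
      rw [scanP, if_pos hq]
      have hPQ : (P c || Q c || c == '-') = true := by
        rcases Bool.or_eq_true_iff.mp hq with h | h <;> simp [h]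
      cases bi with
      | true =>
        have hbo := hbi rfl; subst hbo
        simp only [if_pos]
        rw [ih true true (fun _ => rfl), scanP, if_pos hPQ]
        simp
      | false =>
        simp only [Bool.false_eq_true, if_false]
        have houter : (P '-' || '-' == '-') = true := by simp
        rw [scanP, if_pos houter, scanP, if_pos hPQ]
        cases bo with
        | true => simp only [if_pos]; exact ih true true (fun _ => rfl)
        | false =>
          simp only [Bool.false_eq_true, if_false]
          rw [ih true true (fun _ => rfl)]
    | false =>
      rw [scanP, hq]
      simp only [Bool.false_eq_true, if_false]
      rcases Bool.or_eq_false_iff.mp hq with ⟨hq', hcd⟩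
      by_cases hp : P c = true
      · have houter : (P c || c == '-') = true := by simp [hp]
        have hPQ : (P c || Q c || c == '-') = true := by simp [hp]
        rw [scanP, if_pos houter, scanP, if_pos hPQ]
        cases bo with
        | true => simp only [if_pos]; exact ih true false (fun _ => rfl)
        | false =>
          simp only [Bool.false_eq_true, if_false]
          rw [ih true false (fun _ => rfl)]
      · have hp' : P c = false := by simpa using hp
        have houter : (P c || c == '-') = false := by simp [hp', hcd]
        have hPQ : (P c || Q c || c == '-') = false := by simp [hp', hq', hcd]
        rw [scanP, houter, scanP, hPQ]
        simp only [Bool.false_eq_true, if_false]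
        rw [ih false false (by simp)]

theorem scanP_congr (P Q : Char → Bool) (h : ∀ c, P c = Q c) (l : List Char) : ∀ b,
    scanP P b l = scanP Q b l := by
  induction l with
  | nil => intro b; simp [scanP]
  | cons c t ih =>
    intro b
    rw [scanP, scanP, h c]
    by_cases hq : (Q c || c == '-') = true
    · rw [if_pos hq, if_pos hq]; cases b <;> simp [ih]
    · rw [if_neg hq, if_neg hq, ih]

-- B's foldl accumulates exactly a scanP run
theorem foldl_B (t : List Char) : ∀ (out : List Char),
    t.foldl (fun out ch =>
      if ch ∈ [' ', '_', ',', '/', '-'] then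
        if out = [] ∨ out.getLast? ≠ some '-' then out ++ ['-'] else out
      else out ++ [ch]) out
    = out ++ scanP (fun c => c == ' ' || c == '_' || c == ',' || c == '/')
        (out.getLast? == some '-') t := by
  induction t with
  | nil => intro out; simp [scanP]
  | cons c t ih =>
    intro out
    by_cases hm : c ∈ [' ', '_', ',', '/', '-']
    · have hP : ((fun c => c == ' ' || c == '_' || c == ',' || c == '/') c || c == '-') = true := by
        simp at hm; rcases hm with h|h|h|h|h <;> simp [h]
      rw [List.foldl_cons, if_pos hm, scanP, if_pos hP]
      by_cases hb : (out.getLast? == some '-') = true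
      · have hcond : ¬ (out = [] ∨ out.getLast? ≠ some '-') := by
          simp only [beq_iff_eq] at hb
          push_neg
          refine ⟨fun he => by rw [he] at hb; simp at hb, by simpa using hb⟩
        rw [if_neg hcond, ih out, hb]
        simp only [if_pos]
      · have hcond : out = [] ∨ out.getLast? ≠ some '-' := by
          right; simpa using hb
        rw [if_pos hcond, ih (out ++ ['-'])]
        have hlast : ((out ++ ['-']).getLast? == some '-') = true := by simp
        have hb' : (out.getLast? == some '-') = false := by simpa using hb
        rw [hlast, hb']
        simp only [Bool.false_eq_true, if_false, if_pos, List.append_assoc,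
          List.singleton_append]
    · have hP : ((fun c => c == ' ' || c == '_' || c == ',' || c == '/') c || c == '-') = false := by
        simp at hm; simp [hm]
      rw [List.foldl_cons, if_neg hm, scanP, hP]
      simp only [Bool.false_eq_true, if_false]
      rw [ih (out ++ [c])]
      have hc : ¬ c = '-' := by simp at hm; tauto
      have hlast : ((out ++ [c]).getLast? == some '-') = false := by simp [hc]
      rw [hlast]
      simp

-- ===== VERDICT =====
theorem hyphenate_spec : Claim_equal_hyphenate := by
  intro iname _
  unfold Spec_hyphenate hyphenate hyphenate_alt
  apply String.toList_inj.mp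
  simp only [String.toList_ofList]
  set cs := iname.toList.filter (fun c => c.toNat ≤ 127) with hcs
  rw [foldl_B cs []]
  simp only [List.nil_append, List.getLast?_nil]
  -- A side: unfold the four stages
  simp only [List.foldl_cons, List.foldl_nil]
  have hdash : ("-" : String).toList = ['-'] := by decide
  have stage : ∀ (s : String) (dstr : String) (d : Char), dstr.toList = [d] →
      (pyCollapseLoop (PySem.Str.replace s dstr "-")).toList
        = scanP (fun c => (fun _ => false) c || (fun c => c == d) c) false s.toList := by
    intro s dstr d hd
    rw [pyCollapseLoop_toList, PySem.Str.toList_replace, hd, hdash, replace_single,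
      scanP_map (fun _ => false) (fun c => c == d)]
  rw [stage _ "/" '/' (by decide), stage _ "," ',' (by decide),
    stage _ "_" '_' (by decide), stage _ " " ' ' (by decide)]
  simp only [String.toList_ofList]
  rw [scanP_scanP _ _ _ false false (by simp), scanP_scanP _ _ _ false false (by simp),
    scanP_scanP _ _ _ false false (by simp)]
  have hnone : ((List.getLast? ([] : List Char)) == some '-') = false := by decide
  rw [hnone] at *
  exact scanP_congr _ _ (fun c => by
    cases h1 : (c == ' ') <;> cases h2 : (c == '_') <;> cases h3 : (c == ',') <;>
      cases h4 : (c == '/') <;> simp [h1, h2, h3, h4]) cs false
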